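-- pv_equiv track=rewrite | github.com/algorithm-studying/daily | 2022_03_03/2_python_송정우.py | solution
-- ===== SOURCE A (Python) =====
-- def solution(brown, yellow):
--     divisor = []
--     answer = []
--     tot_size = brown + yellow
--     for i in range(1, tot_size + 1):
--         if tot_size % i == 0:
--             divisor.append(i)
--
--     for n in divisor:
--         set_n = int(tot_size / n)  # 가로, n = 세로
--         if (set_n - 2) * (n - 2) == yellow:
--             answer.append(set_n)
--             answer.append(n)
--             break
--
--     return answer
-- ===== SOURCE B (Python) =====
-- def solution(brown, yellow):
--     # Scan candidate heights n only up to sqrt(total): if any divisor matches,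
--     # the smallest matching one is <= sqrt(total), since the condition is
--     # symmetric under n <-> total//n.
--     tot = brown + yellow
--     n = 1
--     while n * n <= tot:
--         if tot % n == 0:
--             w = tot // n
--             if (w - 2) * (n - 2) == yellow:
--                 return [w, n]
--         n += 1
--     return []
-- ===== Notes on version B (the rewrite author's own statement) =====
-- stated objective: faster
-- what changed: Instead of enumerating every i up to brown+yellow to build a divisor list and then scanning it, B scans candidates only up to sqrt(brown+yellow) in a single loop, relying on the symmetry of the area condition under n <-> total//n to preserve A's smallest-divisor answer.
import Mathlib
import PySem

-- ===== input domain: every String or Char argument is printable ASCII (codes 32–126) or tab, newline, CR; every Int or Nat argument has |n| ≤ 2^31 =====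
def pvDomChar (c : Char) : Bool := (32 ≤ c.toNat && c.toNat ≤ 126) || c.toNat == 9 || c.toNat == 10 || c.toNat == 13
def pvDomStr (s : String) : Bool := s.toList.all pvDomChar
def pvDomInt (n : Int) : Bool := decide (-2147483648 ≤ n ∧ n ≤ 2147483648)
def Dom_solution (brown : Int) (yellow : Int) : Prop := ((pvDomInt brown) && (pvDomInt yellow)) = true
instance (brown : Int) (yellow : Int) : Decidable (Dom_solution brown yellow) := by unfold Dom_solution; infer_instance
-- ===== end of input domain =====

-- B replaces A's O(n) full divisor enumeration by a single O(sqrt n) scan of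
-- candidates up to sqrt(brown+yellow), using the symmetry of the area test.

-- ===== PORT A =====
-- second loop of A: walk the divisor list, return [set_n, n] at the first match
def solutionLoop (tot : Int) (yellow : Int) : List Int → List Int
  | [] => []
  | n :: rest =>
    -- Python writes int(tot/n); exact here, since n divides tot and 1 ≤ n ≤ tot
    let set_n := PySem.Int.floordiv tot n
    if (set_n - 2) * (n - 2) == yellow then [set_n, n]
    else solutionLoop tot yellow rest

def solution (brown : Int) (yellow : Int) : List Int :=
  let tot_size := brown + yellow
  let divisor := (PySem.List.pyRange 1 (tot_size + 1) 1).foldl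
    (fun acc i => if PySem.Int.mod tot_size i == 0 then acc ++ [i] else acc) []
  solutionLoop tot_size yellow divisor

-- ===== PORT B =====
-- B's while loop: n = 1; while n*n <= tot: test n, n += 1
def altLoop (tot : Int) (yellow : Int) (n : Int) : List Int :=
  if n * n ≤ tot then
    if PySem.Int.mod tot n == 0 then
      let w := PySem.Int.floordiv tot n
      if (w - 2) * (n - 2) == yellow then [w, n]
      else altLoop tot yellow (n + 1)
    else altLoop tot yellow (n + 1)
  else []
termination_by (tot + 1 - n).toNat
decreasing_by
  all_goals
    rename_i h
    have hn : n ≤ tot := by nlinarith [sq_nonneg n, sq_nonneg (n - 1), h]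
    omega

def solution_alt (brown : Int) (yellow : Int) : List Int :=
  altLoop (brown + yellow) yellow 1

-- ===== PRECONDITION & SPEC =====
def Spec_solution (brown : Int) (yellow : Int) (out : List Int) : Prop := out = solution_alt brown yellow
instance (brown : Int) (yellow : Int) (out : List Int) : Decidable (Spec_solution brown yellow out) := by unfold Spec_solution; infer_instance

-- ===== CLAIM (what is proved, stated in full; the proofs are below) =====
def Claim_equal_solution : Prop := ∀ (brown : Int) (yellow : Int), Dom_solution brown yellow → Spec_solution brown yellow (solution brown yellow)

-- ===== LEMMAS AND PROOFS =====

-- the combined test both loops apply to a candidate d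
def qb (tot yellow d : Int) : Bool :=
  (PySem.Int.mod tot d == 0) && ((PySem.Int.floordiv tot d - 2) * (d - 2) == yellow)

-- A's answer, normalised: first element of [1..tot] passing qb
theorem solutionLoop_find (tot yellow : Int) (l : List Int) :
    solutionLoop tot yellow l =
      match l.find? (fun n => (PySem.Int.floordiv tot n - 2) * (n - 2) == yellow) with
      | some n => [PySem.Int.floordiv tot n, n]
      | none => [] := by
  induction l with
  | nil => rfl
  | cons n rest ih =>
    simp only [solutionLoop, List.find?_cons]
    by_cases h : ((PySem.Int.floordiv tot n - 2) * (n - 2) == yellow) = true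
    · simp [h]
    · simp only [Bool.not_eq_true] at h
      simp [h, ih]

theorem find?_filter' (l : List Int) (p q : Int → Bool) :
    (l.filter q).find? p = l.find? (fun x => q x && p x) := by
  induction l with
  | nil => rfl
  | cons x rest ih =>
    by_cases hq : q x = true
    · by_cases hp : p x = true
      · simp [hq, hp]
      · simp only [Bool.not_eq_true] at hp
        simp [hq, hp, ih]
    · simp only [Bool.not_eq_true] at hq
      simp [hq, ih]

theorem solution_find (brown yellow : Int) :
    solution brown yellow =
      match (PySem.List.pyRange 1 (brown + yellow + 1) 1).find? (qb (brown + yellow) yellow) with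
      | some n => [PySem.Int.floordiv (brown + yellow) n, n]
      | none => [] := by
  show solutionLoop (brown + yellow) yellow
      ((PySem.List.pyRange 1 (brown + yellow + 1) 1).foldl
        (fun acc i => if PySem.Int.mod (brown + yellow) i == 0 then acc ++ [i] else acc) []) = _
  rw [PySem.List.foldl_append_if_eq_filter]
  rw [solutionLoop_find, List.nil_append, find?_filter']
  rfl

-- altLoop returns [] when no candidate with d*d ≤ tot passes qb
theorem altLoop_nil (tot yellow : Int)
    (hnone : ∀ d : Int, 1 ≤ d → d * d ≤ tot → qb tot yellow d = false) :
    ∀ n : Int, 1 ≤ n → altLoop tot yellow n = [] := by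
  intro n hn
  rw [altLoop]
  split
  · rename_i hle
    have hq := hnone n hn hle
    simp only [qb, Bool.and_eq_false_iff] at hq
    have ih := altLoop_nil tot yellow hnone (n + 1) (by omega)
    rcases hq with hq | hq
    · simp [hq, ih]
    · simp only [beq_eq_false_iff_ne, ne_eq] at hq
      by_cases hm : (PySem.Int.mod tot n == 0) = true
      · simp [hm, hq, ih]
      · simp only [Bool.not_eq_true] at hm
        simp [hm, ih]
  · rfl
termination_by n => (tot + 1 - n).toNat
decreasing_by
  all_goals
    rename_i hle _
    have : n ≤ tot := by nlinarith [hle]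
    omega

-- altLoop returns [tot/n0, n0] when n0 is the least passing candidate and n0*n0 ≤ tot
theorem altLoop_finds (tot yellow n0 : Int)
    (hq0 : qb tot yellow n0 = true) (hsq : n0 * n0 ≤ tot)
    (hmin : ∀ d : Int, 1 ≤ d → d < n0 → qb tot yellow d = false) :
    ∀ n : Int, 1 ≤ n → n ≤ n0 →
      altLoop tot yellow n = [PySem.Int.floordiv tot n0, n0] := by
  intro n hn hle
  have hguard : n * n ≤ tot := le_trans (by nlinarith) hsq
  rw [altLoop]
  rw [if_pos hguard]
  by_cases heq : n = n0
  · subst heq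
    simp only [qb, Bool.and_eq_true] at hq0
    simp [hq0.1, hq0.2]
  · have hlt : n < n0 := lt_of_le_of_ne hle heq
    have hq := hmin n hn hlt
    simp only [qb, Bool.and_eq_false_iff] at hq
    have ih := altLoop_finds tot yellow n0 hq0 hsq hmin (n + 1) (by omega) (by omega)
    rcases hq with hq | hq
    · simp [hq, ih]
    · by_cases hm : (PySem.Int.mod tot n == 0) = true
      · simp [hm, hq, ih]
      · simp only [Bool.not_eq_true] at hm
        simp [hm, ih]
termination_by n => (n0 - n).toNat
decreasing_by omega

-- symmetry of the test: divisors pair up as n ↔ tot/n with the same product value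
theorem qb_cofactor (tot yellow n : Int) (hn : 1 ≤ n) (hle : n ≤ tot)
    (hq : qb tot yellow n = true) :
    let m := PySem.Int.floordiv tot n
    1 ≤ m ∧ m ≤ tot ∧ m * n = tot ∧ qb tot yellow m = true := by
  have hpos : (0:Int) < n := by omega
  simp only [qb, Bool.and_eq_true, beq_iff_eq] at hq
  obtain ⟨hmod, hyel⟩ := hq
  rw [PySem.Int.mod_eq_emod_of_pos hpos] at hmod
  have hdvd : n ∣ tot := Int.dvd_of_emod_eq_zero hmod
  rw [PySem.Int.floordiv_eq_ediv_of_pos hpos] at hyel ⊢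
  intro m
  have hmul : m * n = tot := Int.ediv_mul_cancel hdvd
  have htot1 : (1:Int) ≤ tot := le_trans hn hle
  have hm1 : 1 ≤ m := by nlinarith
  have hmle : m ≤ tot := by nlinarith
  have hmpos : (0:Int) < m := by omega
  refine ⟨hm1, hmle, hmul, ?_⟩
  have hdvd' : m ∣ tot := ⟨n, by omega⟩
  have hdivm : tot / m = n := by
    rw [← hmul]
    exact Int.mul_ediv_cancel_left n (by omega)
  simp only [qb, Bool.and_eq_true, beq_iff_eq]
  constructor
  · rw [PySem.Int.mod_eq_emod_of_pos hmpos]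
    simp [Int.emod_eq_zero_of_dvd hdvd']
  · rw [PySem.Int.floordiv_eq_ediv_of_pos hmpos, hdivm]
    linarith [hyel, mul_comm (tot / n - 2) (n - 2)]

-- every candidate the range loop sees is 1 ≤ d ≤ tot, and conversely
theorem main_eq (brown yellow : Int) : solution brown yellow = solution_alt brown yellow := by
  rw [solution_find]
  unfold solution_alt
  set tot := brown + yellow with htot
  cases hF : (PySem.List.pyRange 1 (tot + 1) 1).find? (qb tot yellow) with
  | none =>
    have hnone : ∀ d : Int, 1 ≤ d → d * d ≤ tot → qb tot yellow d = false := by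
      intro d hd hdd
      have hmem : d ∈ PySem.List.pyRange 1 (tot + 1) 1 := by
        rw [PySem.List.mem_pyRange_one]
        constructor
        · exact hd
        · nlinarith
      have := List.find?_eq_none.mp hF d hmem
      simpa using this
    simp [altLoop_nil tot yellow hnone 1 (by omega)]
  | some n0 =>
    obtain ⟨hq0, as, bs, hsplit, hprev⟩ := List.find?_eq_some_iff_append.mp hF
    have hmem0 : n0 ∈ PySem.List.pyRange 1 (tot + 1) 1 := by
      rw [hsplit]; simp
    rw [PySem.List.mem_pyRange_one] at hmem0
    obtain ⟨hn0one, hn0le⟩ := hmem0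
    have hn0le' : n0 ≤ tot := by omega
    -- minimality: every 1 ≤ d < n0 fails qb
    have hmin : ∀ d : Int, 1 ≤ d → d < n0 → qb tot yellow d = false := by
      intro d hd hdlt
      have hmem : d ∈ PySem.List.pyRange 1 (tot + 1) 1 := by
        rw [PySem.List.mem_pyRange_one]; omega
      rw [hsplit] at hmem
      have hpw : (PySem.List.pyRange 1 (tot + 1) 1).Pairwise (· < ·) :=
        PySem.List.pairwise_lt_pyRange_one 1 (tot + 1)
      rw [hsplit] at hpw
      rcases List.mem_append.mp hmem with hin | hin
      · simpa using hprev d hin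
      · rcases List.mem_cons.mp hin with rfl | hin
        · omega
        · exfalso
          have := (List.pairwise_append.mp hpw).2.1
          have := List.rel_of_pairwise_cons this hin
          omega
    -- symmetry gives n0 * n0 ≤ tot
    obtain ⟨hm1, hmle, hmul, hqm⟩ := qb_cofactor tot yellow n0 hn0one hn0le' hq0
    have hsq : n0 * n0 ≤ tot := by
      by_cases hlt : PySem.Int.floordiv tot n0 < n0
      · have := hmin _ hm1 hlt
        rw [hqm] at this; exact absurd this (by simp)
      · have : n0 ≤ PySem.Int.floordiv tot n0 := not_lt.mp hlt
        have := PySem.Int.floordiv_eq_ediv_of_pos (a := tot) (show (0:Int) < n0 by omega)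
        nlinarith [hmul]
    rw [altLoop_finds tot yellow n0 hq0 hsq hmin 1 (by omega) (by omega)]

-- ===== VERDICT (by name: the statement is the Claim_ definition above) =====
theorem solution_spec : Claim_equal_solution := by
  intro brown yellow _
  unfold Spec_solution
  exact main_eq brown yellow
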